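-- pv_equiv track=rewrite | github.com/asdf8601/gmetrics | src/gmetrics/__init__.py | _format_query_labels
-- ===== SOURCE A (Python) =====
-- _QUERY_LABEL_ORDER = (
--     "pod_name",
--     "node_name",
--     "container_name",
--     "namespace_name",
--     "cluster_name",
--     "location",
--     "memory_type",
-- )
--
-- _QUERY_LABEL_ABBR = {
--     "pod_name": "pod",
--     "node_name": "node",
--     "container_name": "container",
--     "namespace_name": "ns",
--     "cluster_name": "cluster",
--     "location": "loc",
--     "memory_type": "mem_type",
-- }
--
-- _QUERY_LABEL_HIDE = {"project_id"}
--
-- def _format_query_labels(rl, ml):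
--     """Format series labels in stable order with short keys."""
--     combined = {**rl, **ml}
--     seen = set()
--     parts = []
--     for key in _QUERY_LABEL_ORDER:
--         if key in combined:
--             parts.append(f"{_QUERY_LABEL_ABBR.get(key, key)}={combined[key]}")
--             seen.add(key)
--     for k, v in combined.items():
--         if k in seen or k in _QUERY_LABEL_HIDE:
--             continue
--         parts.append(f"{k}={v}")
--     return "  ".join(parts)
-- ===== SOURCE B (Python) =====
-- _QUERY_LABEL_ORDER = (
--     "pod_name",
--     "node_name",
--     "container_name",
--     "namespace_name",
--     "cluster_name",
--     "location",
--     "memory_type",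
-- )
--
-- _QUERY_LABEL_ABBR = {
--     "pod_name": "pod",
--     "node_name": "node",
--     "container_name": "container",
--     "namespace_name": "ns",
--     "cluster_name": "cluster",
--     "location": "loc",
--     "memory_type": "mem_type",
-- }
--
-- _QUERY_LABEL_HIDE = {"project_id"}
--
-- _RANK = {k: i for i, k in enumerate(_QUERY_LABEL_ORDER)}
--
--
-- def _format_query_labels(rl, ml):
--     """Bucket the merged labels by priority rank in a single pass, then flatten."""
--     combined = {**rl, **ml}
--     n = len(_QUERY_LABEL_ORDER)
--     buckets = [[] for _ in range(n + 1)]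
--     for k, v in combined.items():
--         if k in _QUERY_LABEL_HIDE:
--             continue
--         buckets[_RANK.get(k, n)].append(f"{_QUERY_LABEL_ABBR.get(k, k)}={v}")
--     return "  ".join(part for bucket in buckets for part in bucket)
-- ===== Notes on version B (the rewrite author's own statement) =====
-- stated objective: alternative
-- what changed: A's two scans (a priority pass over the order tuple plus a leftover pass over the dict guarded by a 'seen' set) are replaced by a single bucket-sort pass over the merged items using a precomputed rank table, then flattening the buckets.
import Mathlib
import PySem

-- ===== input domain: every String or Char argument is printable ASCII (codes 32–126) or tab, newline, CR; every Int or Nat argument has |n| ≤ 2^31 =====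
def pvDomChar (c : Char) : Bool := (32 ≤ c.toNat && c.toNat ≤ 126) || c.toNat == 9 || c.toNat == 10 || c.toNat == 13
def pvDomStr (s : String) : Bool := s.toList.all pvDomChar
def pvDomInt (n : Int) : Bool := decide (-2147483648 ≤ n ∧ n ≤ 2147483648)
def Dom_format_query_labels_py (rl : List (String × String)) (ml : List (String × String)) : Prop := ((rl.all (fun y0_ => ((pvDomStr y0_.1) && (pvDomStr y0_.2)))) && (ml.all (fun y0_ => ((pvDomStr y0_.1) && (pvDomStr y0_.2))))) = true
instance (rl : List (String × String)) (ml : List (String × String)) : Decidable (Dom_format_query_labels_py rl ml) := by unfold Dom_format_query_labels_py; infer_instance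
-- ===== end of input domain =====

-- B replaces A's two scans (priority pass over the order tuple, then a leftover pass over the
-- merged dict guarded by a 'seen' set) by a single bucket-sort pass over the merged items;
-- objective: alternative decomposition, not speed.

-- module constants (the same module-level data in both Pythons)
def pvOrder : List String :=
  ["pod_name", "node_name", "container_name", "namespace_name", "cluster_name", "location", "memory_type"]

def pvAbbr : PySem.Dict String String :=
  PySem.Dict.ofList [("pod_name", "pod"), ("node_name", "node"), ("container_name", "container"),
    ("namespace_name", "ns"), ("cluster_name", "cluster"), ("location", "loc"), ("memory_type", "mem_type")]

def pvHide : PySem.Set String := PySem.Set.ofList ["project_id"]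

-- ===== PORT A =====
def format_query_labels_py (rl : List (String × String)) (ml : List (String × String)) : String :=
  -- combined = {**rl, **ml}
  let combined : PySem.Dict String String :=
    (rl ++ ml).foldl (fun d p => d.insert p.1 p.2) PySem.Dict.empty
  -- first loop: parts/seen over _QUERY_LABEL_ORDER
  let st : List String × PySem.Set String :=
    pvOrder.foldl (fun st key =>
      if combined.contains key then
        (st.1 ++ [pvAbbr.getD key key ++ "=" ++ combined.getD key ""], st.2.add key)
      else st) ([], PySem.Set.empty)
  -- second loop: remaining items, skipping seen and hidden keys
  let parts : List String :=
    combined.items.foldl (fun ps p =>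
      if st.2.contains p.1 || pvHide.contains p.1 then ps
      else ps ++ [p.1 ++ "=" ++ p.2]) st.1
  PySem.Str.join "  " parts

-- ===== PORT B =====
-- _RANK = {k: i for i, k in enumerate(_QUERY_LABEL_ORDER)}
def pvRank : PySem.Dict String Int :=
  (PySem.List.enumerate pvOrder).foldl (fun d p => d.insert p.2 p.1) PySem.Dict.empty

def format_query_labels_py_alt (rl : List (String × String)) (ml : List (String × String)) : String :=
  -- combined = {**rl, **ml}
  let combined : PySem.Dict String String :=
    (rl ++ ml).foldl (fun d p => d.insert p.1 p.2) PySem.Dict.empty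
  let n : Nat := pvOrder.length
  -- one pass: drop hidden keys, append each formatted item to its rank bucket
  let buckets : List (List String) :=
    combined.items.foldl (fun bs p =>
      if pvHide.contains p.1 then bs
      else
        let r : Nat := (pvRank.getD p.1 (n : Int)).toNat
        bs.set r (bs.getD r [] ++ [pvAbbr.getD p.1 p.1 ++ "=" ++ p.2]))
      (List.replicate (n + 1) [])
  PySem.Str.join "  " buckets.flatten

-- ===== PRECONDITION & SPEC =====
def Spec_format_query_labels_py (rl : List (String × String)) (ml : List (String × String)) (out : String) : Prop := out = format_query_labels_py_alt rl ml
instance (rl : List (String × String)) (ml : List (String × String)) (out : String) : Decidable (Spec_format_query_labels_py rl ml out) := by unfold Spec_format_query_labels_py; infer_instance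

-- ===== CLAIM (what is proved, stated in full; the proofs are below) =====
def Claim_equal_format_query_labels_py : Prop := ∀ (rl : List (String × String)) (ml : List (String × String)), Dom_format_query_labels_py rl ml → Spec_format_query_labels_py rl ml (format_query_labels_py rl ml)

-- ===== LEMMAS AND PROOFS =====

-- literal forms of the two module dicts
theorem pvAbbr_eq : pvAbbr = PySem.Dict.mk [("pod_name", "pod"), ("node_name", "node"),
    ("container_name", "container"), ("namespace_name", "ns"), ("cluster_name", "cluster"),
    ("location", "loc"), ("memory_type", "mem_type")] := by decide

theorem pvRank_eq : pvRank = PySem.Dict.mk [("pod_name", 0), ("node_name", 1), ("container_name", 2),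
    ("namespace_name", 3), ("cluster_name", 4), ("location", 5), ("memory_type", 6)] := by decide

-- the rank B computes, as a plain if-chain on the key
def pvRankFun (k : String) : Nat :=
  if k = "pod_name" then 0 else if k = "node_name" then 1 else if k = "container_name" then 2
  else if k = "namespace_name" then 3 else if k = "cluster_name" then 4 else if k = "location" then 5
  else if k = "memory_type" then 6 else 7

theorem rnk_eq_fun (k : String) : (pvRank.getD k (7 : Int)).toNat = pvRankFun k := by
  unfold pvRankFun
  by_cases h1 : k = "pod_name"; · subst h1; decide
  by_cases h2 : k = "node_name"; · subst h2; decide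
  by_cases h3 : k = "container_name"; · subst h3; decide
  by_cases h4 : k = "namespace_name"; · subst h4; decide
  by_cases h5 : k = "cluster_name"; · subst h5; decide
  by_cases h6 : k = "location"; · subst h6; decide
  by_cases h7 : k = "memory_type"; · subst h7; decide
  rw [if_neg h1, if_neg h2, if_neg h3, if_neg h4, if_neg h5, if_neg h6, if_neg h7, pvRank_eq]
  simp [PySem.Dict.getD_eq_get?_getD, PySem.Dict.get?,
    Ne.symm h1, Ne.symm h2, Ne.symm h3, Ne.symm h4, Ne.symm h5, Ne.symm h6, Ne.symm h7]

theorem rankFun_lt (k : String) : pvRankFun k < 8 := by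
  unfold pvRankFun; split_ifs <;> omega

theorem rankFun_eq_seven_iff (k : String) : pvRankFun k = 7 ↔ k ∉ pvOrder := by
  unfold pvRankFun
  simp [pvOrder]
  split_ifs <;> simp_all

theorem set_contains_true_iff (s : PySem.Set String) (x : String) : s.contains x = true ↔ x ∈ s := by
  simp [PySem.Set.contains]

theorem abbr_getD_of_not_mem (k : String) (h : k ∉ pvOrder) : pvAbbr.getD k k = k := by
  simp [pvOrder] at h
  obtain ⟨h1, h2, h3, h4, h5, h6, h7⟩ := h
  rw [pvAbbr_eq]
  simp [PySem.Dict.getD_eq_get?_getD, PySem.Dict.get?_mk_cons, PySem.Dict.get?,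
    Ne.symm h1, Ne.symm h2, Ne.symm h3, Ne.symm h4, Ne.symm h5, Ne.symm h6, Ne.symm h7]

-- the formatting function B applies to every surviving item
def pvFmt (p : String × String) : String := pvAbbr.getD p.1 p.1 ++ "=" ++ p.2

-- ===== A-side loop shapes =====

-- A's first loop: parts collect the contained order keys, seen collects the same keys as a set
theorem loopA1 (d : PySem.Dict String String) (ks : List String) (P : List String) (S : PySem.Set String) :
    ks.foldl (fun st key =>
      if d.contains key then
        (st.1 ++ [pvAbbr.getD key key ++ "=" ++ d.getD key ""], st.2.add key)
      else st) (P, S)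
    = (P ++ (ks.filter d.contains).map (fun k => pvAbbr.getD k k ++ "=" ++ d.getD k ""),
       S.update (ks.filter d.contains)) := by
  induction ks generalizing P S with
  | nil => simp [PySem.Set.update]
  | cons k t ih =>
    by_cases hc : d.contains k
    · simp [hc, ih, PySem.Set.update]
    · simp [hc, ih]

-- A's second loop is a filtered map
theorem loopA2 (d : PySem.Dict String String) (S : PySem.Set String) (P : List String) :
    d.items.foldl (fun ps p =>
      if S.contains p.1 || pvHide.contains p.1 then ps
      else ps ++ [p.1 ++ "=" ++ p.2]) P
    = P ++ (d.items.filter (fun p => !(S.contains p.1 || pvHide.contains p.1))).map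
        (fun p => p.1 ++ "=" ++ p.2) := by
  rw [show (fun (ps : List String) (p : String × String) =>
      if S.contains p.1 || pvHide.contains p.1 then ps else ps ++ [p.1 ++ "=" ++ p.2])
    = (fun ps p => if !(S.contains p.1 || pvHide.contains p.1) then ps ++ [p.1 ++ "=" ++ p.2] else ps)
    from funext fun ps => funext fun p => by cases h : (S.contains p.1 || pvHide.contains p.1) <;> simp [h]]
  exact PySem.List.foldl_append_if _ _ _ _

-- membership in A's seen set
theorem seen_contains (d : PySem.Dict String String) (x : String) :
    ((PySem.Set.empty : PySem.Set String).update (pvOrder.filter d.contains)).contains x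
    = (decide (x ∈ pvOrder) && d.contains x) := by
  rw [Bool.eq_iff_iff]
  rw [set_contains_true_iff, PySem.Set.mem_update]
  simp [PySem.Set.empty, List.mem_filter]

-- ===== B-side loop shapes =====

-- B's bucket loop, with the rank already in if-chain form
theorem bucket_getD (L : List (String × String)) :
    ∀ (bs : List (List String)), (∀ p ∈ L, ¬pvHide.contains p.1 = true → pvRankFun p.1 < bs.length) →
    ∀ (i : Nat),
    (L.foldl (fun bs p =>
      if pvHide.contains p.1 then bs
      else bs.set (pvRankFun p.1) (bs.getD (pvRankFun p.1) [] ++ [pvFmt p])) bs).getD i []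
    = bs.getD i [] ++ (L.filter (fun p => !pvHide.contains p.1 && pvRankFun p.1 == i)).map pvFmt := by
  induction L with
  | nil => intro bs _ i; simp
  | cons p t ih =>
    intro bs hb i
    rw [List.foldl_cons, List.filter_cons]
    by_cases hh : pvHide.contains p.1
    · rw [if_pos hh]
      have hc : (!pvHide.contains p.1 && pvRankFun p.1 == i) = false := by rw [hh]; rfl
      rw [hc]
      simp only [Bool.false_eq_true, if_false]
      exact ih bs (fun q hq => hb q (List.mem_cons_of_mem _ hq)) i
    · rw [if_neg hh]
      have hf : pvHide.contains p.1 = false := by revert hh; cases pvHide.contains p.1 <;> simp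
      set bs' := bs.set (pvRankFun p.1) (bs.getD (pvRankFun p.1) [] ++ [pvFmt p]) with hbs'
      have hr : pvRankFun p.1 < bs.length := hb p List.mem_cons_self hh
      have hlen : bs'.length = bs.length := by rw [hbs']; exact List.length_set
      rw [ih bs' (fun q hq hq' => hlen ▸ hb q (List.mem_cons_of_mem _ hq) hq') i]
      by_cases hi : pvRankFun p.1 = i
      · have hcond : (!pvHide.contains p.1 && pvRankFun p.1 == i) = true := by
          rw [Bool.and_eq_true]; exact ⟨by rw [hf]; rfl, by simp [hi]⟩
        rw [hcond, if_pos rfl]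
        subst hi
        have hset : bs'.getD (pvRankFun p.1) [] = bs.getD (pvRankFun p.1) [] ++ [pvFmt p] := by
          rw [hbs']; simp [List.getD, List.getElem?_set, hr]
        rw [hset, List.map_cons]
        simp [List.append_assoc]
      · have hcond : (!pvHide.contains p.1 && pvRankFun p.1 == i) = false := by simp [hi]
        rw [hcond]
        simp only [Bool.false_eq_true, if_false]
        have hset : bs'.getD i [] = bs.getD i [] := by
          rw [hbs']; simp [List.getD, List.getElem?_set, hi]
        rw [hset]

theorem bucket_length (L : List (String × String)) :
    ∀ (bs : List (List String)),
    (L.foldl (fun bs p =>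
      if pvHide.contains p.1 then bs
      else bs.set (pvRankFun p.1) (bs.getD (pvRankFun p.1) [] ++ [pvFmt p])) bs).length = bs.length := by
  induction L with
  | nil => intro bs; rfl
  | cons p t ih =>
    intro bs
    rw [List.foldl_cons]
    by_cases hh : pvHide.contains p.1
    · rw [if_pos hh]; exact ih bs
    · rw [if_neg hh, ih]; exact List.length_set

theorem filter_key_of_mem {k : String} {v : String} (L : List (String × String))
    (hnd : (L.map Prod.fst).Nodup) (hm : (k, v) ∈ L) :
    L.filter (fun p => p.1 == k) = [(k, v)] := by
  induction L with
  | nil => cases hm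
  | cons q t ih =>
    simp only [List.map_cons, List.nodup_cons] at hnd
    rcases List.mem_cons.mp hm with h | h
    · rw [← h]
      simp only [List.filter_cons, beq_self_eq_true, if_pos rfl]
      have hnil : t.filter (fun p => p.1 == k) = [] := by
        apply List.filter_eq_nil_iff.mpr
        intro p hp hbeq
        have hpk : p.1 = k := by simpa using hbeq
        have : k ∈ t.map Prod.fst := hpk ▸ List.mem_map_of_mem hp
        rw [← h] at hnd
        exact hnd.1 this
      simp [hnil]
    · have hq : (q.1 == k) = false := by
        by_contra hq
        have hq' : q.1 = k := by
          revert hq; cases hqq : (q.1 == k) <;> simp_all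
        exact hnd.1 (hq' ▸ List.mem_map_of_mem h)
      simp only [List.filter_cons, hq]
      simpa using ih hnd.2 h

-- ===== items of a nodup-keyed dict, filtered at one key =====

theorem filter_key (d : PySem.Dict String String) (hnd : d.keys.Nodup) (k : String) :
    d.items.filter (fun p => p.1 == k)
    = if d.contains k then [(k, d.getD k "")] else [] := by
  by_cases hc : d.contains k
  · rw [if_pos hc]
    have hsome : (d.get? k).isSome := by rw [← PySem.Dict.contains_eq_isSome_get?]; exact hc
    obtain ⟨v, hv⟩ := Option.isSome_iff_exists.mp hsome
    rw [PySem.Dict.getD_of_get?_eq_some d "" hv]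
    exact filter_key_of_mem d.items hnd (PySem.Dict.mem_items_of_get?_eq_some d hv)
  · rw [if_neg hc]
    apply List.filter_eq_nil_iff.mpr
    intro p hp hbeq
    have : p.1 = k := by simpa using hbeq
    exact hc (by
      rw [PySem.Dict.contains_iff_mem_keys]
      exact this ▸ PySem.Dict.mem_keys_of_mem_items d hp)

-- a priority bucket holds exactly the (at most one) item at its order key
theorem bucket_pri (d : PySem.Dict String String) (hnd : d.keys.Nodup)
    (i : Nat) (k : String) (hk : ∀ x : String, (pvRankFun x = i ↔ x = k)) (hkh : ¬pvHide.contains k) :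
    (d.items.filter (fun p => !pvHide.contains p.1 && pvRankFun p.1 == i)).map pvFmt
    = if d.contains k then [pvAbbr.getD k k ++ "=" ++ d.getD k ""] else [] := by
  have hcond : (fun p : String × String => !pvHide.contains p.1 && pvRankFun p.1 == i)
      = (fun p : String × String => p.1 == k) := by
    funext p
    by_cases hp : p.1 = k
    · have hf : pvHide.contains k = false := by revert hkh; cases pvHide.contains k <;> simp
      rw [hp, hf, show pvRankFun k = i from (hk k).mpr rfl]
      simp
    · have hrne : pvRankFun p.1 ≠ i := fun hh => hp ((hk p.1).mp hh)
      rw [beq_eq_false_iff_ne.mpr hrne, beq_eq_false_iff_ne.mpr hp]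
      simp
  rw [hcond, filter_key d hnd k]
  by_cases hc : d.contains k <;> simp [hc, pvFmt]

-- the seven instantiations of bucket_pri's key characterisation
theorem rank_iff_0 (x : String) : pvRankFun x = 0 ↔ x = "pod_name" := by
  unfold pvRankFun; split_ifs <;> simp_all
theorem rank_iff_1 (x : String) : pvRankFun x = 1 ↔ x = "node_name" := by
  unfold pvRankFun; split_ifs <;> simp_all
theorem rank_iff_2 (x : String) : pvRankFun x = 2 ↔ x = "container_name" := by
  unfold pvRankFun; split_ifs <;> simp_all
theorem rank_iff_3 (x : String) : pvRankFun x = 3 ↔ x = "namespace_name" := by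
  unfold pvRankFun; split_ifs <;> simp_all
theorem rank_iff_4 (x : String) : pvRankFun x = 4 ↔ x = "cluster_name" := by
  unfold pvRankFun; split_ifs <;> simp_all
theorem rank_iff_5 (x : String) : pvRankFun x = 5 ↔ x = "location" := by
  unfold pvRankFun; split_ifs <;> simp_all
theorem rank_iff_6 (x : String) : pvRankFun x = 6 ↔ x = "memory_type" := by
  unfold pvRankFun; split_ifs <;> simp_all

-- the last bucket equals A's leftover pass
theorem bucket_rest (d : PySem.Dict String String) :
    (d.items.filter (fun p => !pvHide.contains p.1 && pvRankFun p.1 == 7)).map pvFmt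
    = (d.items.filter (fun p =>
        !(((PySem.Set.empty : PySem.Set String).update (pvOrder.filter d.contains)).contains p.1
          || pvHide.contains p.1))).map (fun p => p.1 ++ "=" ++ p.2) := by
  have hcontm : ∀ p ∈ d.items, d.contains p.1 = true := fun p hp => by
    rw [PySem.Dict.contains_iff_mem_keys]
    exact PySem.Dict.mem_keys_of_mem_items d hp
  have hfil : d.items.filter (fun p => !pvHide.contains p.1 && pvRankFun p.1 == 7)
      = d.items.filter (fun p =>
        !(((PySem.Set.empty : PySem.Set String).update (pvOrder.filter d.contains)).contains p.1
          || pvHide.contains p.1)) := by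
    apply List.filter_congr
    intro p hp
    rw [seen_contains d p.1, hcontm p hp]
    by_cases ho : p.1 ∈ pvOrder
    · have h7 : pvRankFun p.1 ≠ 7 := fun hh => (rankFun_eq_seven_iff p.1).mp hh ho
      rw [beq_eq_false_iff_ne.mpr h7, decide_eq_true ho]
      simp
    · have h7 : pvRankFun p.1 = 7 := (rankFun_eq_seven_iff p.1).mpr ho
      rw [h7, decide_eq_false ho]
      simp
  rw [hfil]
  apply List.map_congr_left
  intro p hp
  obtain ⟨hpmem, hpc⟩ := List.mem_filter.mp hp
  rw [seen_contains d p.1, hcontm p hpmem] at hpc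
  have hpo : p.1 ∉ pvOrder := by
    intro ho
    rw [decide_eq_true ho] at hpc
    simp at hpc
  simp [pvFmt, abbr_getD_of_not_mem p.1 hpo]

-- filtered-map over a list as a flatMap of singletons
theorem filter_map_eq_flatMap (ks : List String) (c : String → Bool) (f : String → String) :
    (ks.filter c).map f = ks.flatMap (fun k => if c k then [f k] else []) := by
  induction ks with
  | nil => rfl
  | cons k t ih => by_cases hc : c k <;> simp [hc, ih]

-- keys of the merged dict are unique
theorem combined_nodup (rl ml : List (String × String)) :
    ((rl ++ ml).foldl (fun d p => d.insert p.1 p.2) (PySem.Dict.empty : PySem.Dict String String)).keys.Nodup := by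
  exact PySem.Dict.nodup_keys_foldl_insert_key (rl ++ ml) Prod.fst (fun _ p => p.2) _
    (by simp [PySem.Dict.empty, PySem.Dict.keys])

-- buckets of the merged dict, as an explicit eight-list
theorem buckets_eq (d : PySem.Dict String String) :
    d.items.foldl (fun bs p =>
      if pvHide.contains p.1 then bs
      else bs.set (pvRankFun p.1) (bs.getD (pvRankFun p.1) [] ++ [pvFmt p]))
      (List.replicate 8 [])
    = [0, 1, 2, 3, 4, 5, 6, 7].map (fun i =>
        (d.items.filter (fun p => !pvHide.contains p.1 && pvRankFun p.1 == i)).map pvFmt) := by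
  have hb : ∀ p ∈ d.items, ¬pvHide.contains p.1 = true →
      pvRankFun p.1 < (List.replicate 8 ([] : List String)).length := by
    intro p _ _
    rw [List.length_replicate]
    exact rankFun_lt p.1
  have hget : ∀ i, (d.items.foldl (fun bs p =>
      if pvHide.contains p.1 then bs
      else bs.set (pvRankFun p.1) (bs.getD (pvRankFun p.1) [] ++ [pvFmt p]))
      (List.replicate 8 [])).getD i []
      = (d.items.filter (fun p => !pvHide.contains p.1 && pvRankFun p.1 == i)).map pvFmt := by
    intro i
    rw [bucket_getD d.items (List.replicate 8 []) hb i]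
    have : (List.replicate 8 ([] : List String)).getD i [] = [] := by
      rcases lt_or_ge i 8 with h | h
      · rw [List.getD, List.getElem?_eq_getElem (by simpa using h)]
        interval_cases i <;> rfl
      · rw [List.getD, List.getElem?_eq_none (by simpa using h)]
        rfl
    rw [this, List.nil_append]
  have hlen : (d.items.foldl (fun bs p =>
      if pvHide.contains p.1 then bs
      else bs.set (pvRankFun p.1) (bs.getD (pvRankFun p.1) [] ++ [pvFmt p]))
      (List.replicate 8 [])).length = 8 := by
    rw [bucket_length]
    exact List.length_replicate
  apply List.ext_getElem
  · rw [hlen]; simp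
  · intro i h1 h2
    have hi8 : i < 8 := by rw [hlen] at h1; exact h1
    have := hget i
    rw [List.getD, List.getElem?_eq_getElem h1] at this
    simp only [Option.getD_some] at this
    rw [this]
    simp only [List.length_map] at h2
    interval_cases i <;> rfl

-- the two programs agree on every merged dict with unique keys (i.e. on every dict)
theorem ports_eq (d : PySem.Dict String String) (hnd : d.keys.Nodup) :
    PySem.Str.join "  "
      (d.items.foldl (fun ps p =>
        if (pvOrder.foldl (fun st key =>
              if d.contains key then
                (st.1 ++ [pvAbbr.getD key key ++ "=" ++ d.getD key ""], st.2.add key)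
              else st) ([], PySem.Set.empty)).2.contains p.1 || pvHide.contains p.1 then ps
        else ps ++ [p.1 ++ "=" ++ p.2])
        (pvOrder.foldl (fun st key =>
              if d.contains key then
                (st.1 ++ [pvAbbr.getD key key ++ "=" ++ d.getD key ""], st.2.add key)
              else st) ([], PySem.Set.empty)).1)
    = PySem.Str.join "  "
      (d.items.foldl (fun bs p =>
        if pvHide.contains p.1 then bs
        else bs.set ((pvRank.getD p.1 ((pvOrder.length : Nat) : Int)).toNat)
          (bs.getD ((pvRank.getD p.1 ((pvOrder.length : Nat) : Int)).toNat) []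
            ++ [pvAbbr.getD p.1 p.1 ++ "=" ++ p.2]))
        (List.replicate (pvOrder.length + 1) [])).flatten := by
  congr 1
  rw [loopA1 d pvOrder [] PySem.Set.empty]
  rw [loopA2 d]
  have hbody : (fun (bs : List (List String)) (p : String × String) =>
      if pvHide.contains p.1 then bs
      else bs.set ((pvRank.getD p.1 ((pvOrder.length : Nat) : Int)).toNat)
        (bs.getD ((pvRank.getD p.1 ((pvOrder.length : Nat) : Int)).toNat) []
          ++ [pvAbbr.getD p.1 p.1 ++ "=" ++ p.2]))
    = (fun bs p => if pvHide.contains p.1 then bs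
        else bs.set (pvRankFun p.1) (bs.getD (pvRankFun p.1) [] ++ [pvFmt p])) := by
    funext bs p
    rw [show ((pvOrder.length : Nat) : Int) = (7 : Int) from rfl, rnk_eq_fun p.1]
    rfl
  rw [hbody,
    show List.replicate (pvOrder.length + 1) ([] : List String) = List.replicate 8 [] from rfl,
    buckets_eq d]
  simp only [List.map_cons, List.map_nil, List.flatten_cons, List.flatten_nil]
  rw [bucket_pri d hnd 0 "pod_name" rank_iff_0 (by decide),
    bucket_pri d hnd 1 "node_name" rank_iff_1 (by decide),
    bucket_pri d hnd 2 "container_name" rank_iff_2 (by decide),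
    bucket_pri d hnd 3 "namespace_name" rank_iff_3 (by decide),
    bucket_pri d hnd 4 "cluster_name" rank_iff_4 (by decide),
    bucket_pri d hnd 5 "location" rank_iff_5 (by decide),
    bucket_pri d hnd 6 "memory_type" rank_iff_6 (by decide),
    bucket_rest d]
  rw [filter_map_eq_flatMap pvOrder d.contains]
  simp only [pvOrder, List.flatMap_cons, List.flatMap_nil, List.append_nil, List.nil_append,
    List.append_assoc]

-- ===== VERDICT (by name: the statement is the Claim_ definition above) =====
theorem format_query_labels_py_spec : Claim_equal_format_query_labels_py := by
  intro rl ml _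
  unfold Spec_format_query_labels_py format_query_labels_py format_query_labels_py_alt
  exact ports_eq _ (combined_nodup rl ml)
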